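-- pv_equiv track=rewrite | github.com/ChiefAntiphates/wordle-solver | wordleSolver.py | getDifferentCharWords
-- ===== SOURCE A (Python) =====
-- def getDifferentCharWords(potentials, allowed_repeats=0):#
--     suggested = []
--     for word in potentials:
--         repeats = 0
--         chars = []
--         for char in word:
--             if char in chars:
--                 repeats += 1
--             chars.append(char)
--         if repeats <= allowed_repeats:
--             suggested.append(word)
--     if len(suggested)==0 and allowed_repeats <= 5:#
--         suggested = getDifferentCharWords(potentials, allowed_repeats+1)
--     return suggested
-- ===== SOURCE B (Python) =====
-- def getDifferentCharWords(potentials, allowed_repeats=0):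
--     scored = [(w, len(w) - len(set(w))) for w in potentials]
--     t = allowed_repeats
--     suggested = [w for w, r in scored if r <= t]
--     while not suggested and t <= 5:
--         t += 1
--         suggested = [w for w, r in scored if r <= t]
--     return suggested
-- ===== Notes on version B (the rewrite author's own statement) =====
-- stated objective: simpler
-- what changed: Each word's repeat count is computed once as len(w)-len(set(w)) instead of an inner membership-tracking loop, and the tail recursion over the threshold is replaced by an explicit while loop that refilters the precomputed scores.
-- outside the precondition, e.g. on getDifferentCharWords([], -600): A returns [], B returns []
import Mathlib
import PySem

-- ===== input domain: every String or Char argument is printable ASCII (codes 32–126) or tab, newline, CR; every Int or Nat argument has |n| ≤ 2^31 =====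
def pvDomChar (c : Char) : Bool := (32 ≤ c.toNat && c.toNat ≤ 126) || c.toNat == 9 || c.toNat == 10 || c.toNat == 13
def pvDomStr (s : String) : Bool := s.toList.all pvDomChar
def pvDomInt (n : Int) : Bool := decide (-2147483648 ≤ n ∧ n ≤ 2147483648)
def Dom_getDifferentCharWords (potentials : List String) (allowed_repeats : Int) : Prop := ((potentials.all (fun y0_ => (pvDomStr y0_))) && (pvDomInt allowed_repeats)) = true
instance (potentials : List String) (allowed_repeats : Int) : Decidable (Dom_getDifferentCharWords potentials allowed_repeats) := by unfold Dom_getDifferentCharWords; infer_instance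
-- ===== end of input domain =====

-- ===== PORT A =====
-- header: B computes each word's repeat count once as len(w)-len(set(w)) and climbs the threshold with a loop; objective: simpler
-- inner loop of A: for char in word: if char in chars: repeats += 1; chars.append(char)
def pvDupLoop (chars : List Char) (repeats : Int) (l : List Char) : Int :=
  match l with
  | [] => repeats
  | c :: cs => pvDupLoop (chars ++ [c]) (if chars.contains c then repeats + 1 else repeats) cs

-- the recursion of A, with fuel (6 - allowed_repeats).toNat as a totality guard (the 0 branch is unreachable)
def pvRecA (potentials : List String) (fuel : Nat) (allowed_repeats : Int) : List String :=
  let suggested := potentials.foldl (fun acc word =>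
    if pvDupLoop [] 0 word.toList ≤ allowed_repeats then acc ++ [word] else acc) []
  if suggested.length = 0 ∧ allowed_repeats ≤ 5 then
    match fuel with
    | 0 => suggested
    | f + 1 => pvRecA potentials f (allowed_repeats + 1)
  else suggested

def getDifferentCharWords (potentials : List String) (allowed_repeats : Int) : List String :=
  pvRecA potentials (6 - allowed_repeats).toNat allowed_repeats

-- ===== PORT B =====
-- len(w) - len(set(w))
def pvScore (w : String) : Int :=
  (w.toList.length : Int) - ((PySem.Set.ofList w.toList).length : Int)

-- [w for w, r in scored if r <= t]
def pvRefilter (scored : List (String × Int)) (t : Int) : List String :=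
  (scored.filter (fun p => p.2 ≤ t)).map Prod.fst

-- while not suggested and t <= 5: t += 1; suggested = [w for w, r in scored if r <= t]
-- the while loop of B, with fuel (6 - t).toNat as a totality guard (the 0 branch is unreachable)
def pvClimb (scored : List (String × Int)) (fuel : Nat) (t : Int) (suggested : List String) : List String :=
  if suggested = [] ∧ t ≤ 5 then
    match fuel with
    | 0 => suggested
    | f + 1 => pvClimb scored f (t + 1) (pvRefilter scored (t + 1))
  else suggested

def getDifferentCharWords_alt (potentials : List String) (allowed_repeats : Int) : List String :=
  let scored := potentials.map (fun w => (w, pvScore w))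
  pvClimb scored (6 - allowed_repeats).toNat allowed_repeats (pvRefilter scored allowed_repeats)

-- ===== PRECONDITION & SPEC =====
-- Pre_ excludes very negative allowed_repeats: there CPython's recursion limit makes A raise
-- RecursionError while climbing the threshold (observed from about -992 downward); the margin to -500
-- also excludes a small band of returning inputs because the exact raise boundary depends on the
-- interpreter's current stack depth.
def Pre_getDifferentCharWords (potentials : List String) (allowed_repeats : Int) : Prop :=
  -500 ≤ allowed_repeats
instance (potentials : List String) (allowed_repeats : Int) : Decidable (Pre_getDifferentCharWords potentials allowed_repeats) := by unfold Pre_getDifferentCharWords; infer_instance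
def pvWitness_getDifferentCharWords : List String × Int := ([], 0)
def Spec_getDifferentCharWords (potentials : List String) (allowed_repeats : Int) (out : List String) : Prop := out = getDifferentCharWords_alt potentials allowed_repeats
instance (potentials : List String) (allowed_repeats : Int) (out : List String) : Decidable (Spec_getDifferentCharWords potentials allowed_repeats out) := by unfold Spec_getDifferentCharWords; infer_instance

-- ===== CLAIM (what is proved, stated in full; the proofs are below) =====
def Claim_equal_getDifferentCharWords : Prop := ∀ (potentials : List String) (allowed_repeats : Int), Dom_getDifferentCharWords potentials allowed_repeats → Pre_getDifferentCharWords potentials allowed_repeats → Spec_getDifferentCharWords potentials allowed_repeats (getDifferentCharWords potentials allowed_repeats)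

-- ===== LEMMAS AND PROOFS =====

theorem pvLength_add {α : Type} [BEq α] [LawfulBEq α] (s : PySem.Set α) (x : α) :
    (PySem.Set.add s x).length = if x ∈ s then s.length else s.length + 1 := by
  rw [PySem.Set.add_eq_ite]
  split_ifs <;> simp

theorem pvDupLoop_eq : ∀ (l chars : List Char) (r : Int),
    pvDupLoop chars r l =
      r + (l.length : Int) -
        (((PySem.Set.ofList chars).update l).length - ((PySem.Set.ofList chars).length : Int)) := by
  intro l
  induction l with
  | nil => intro chars r; simp [pvDupLoop, PySem.Set.update]
  | cons c cs ih =>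
    intro chars r
    rw [pvDupLoop, ih]
    have h1 : PySem.Set.ofList (chars ++ [c]) = PySem.Set.add (PySem.Set.ofList chars) c :=
      PySem.Set.ofList_append_singleton _ _
    have h2 : (PySem.Set.ofList chars).update (c :: cs) =
        (PySem.Set.add (PySem.Set.ofList chars) c).update cs := PySem.Set.update_cons _ _ _
    have h3 : (PySem.Set.add (PySem.Set.ofList chars) c).length =
        if c ∈ PySem.Set.ofList chars then (PySem.Set.ofList chars).length
        else (PySem.Set.ofList chars).length + 1 := pvLength_add _ _
    have hm : c ∈ PySem.Set.ofList chars ↔ c ∈ chars := PySem.Set.mem_ofList _ _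
    rw [h1, h2]
    by_cases hc : c ∈ chars
    · have : chars.contains c = true := by simpa using hc
      rw [this, h3, if_pos (hm.mpr hc)]
      simp only [if_true, List.length_cons]; push_cast; omega
    · have : chars.contains c = false := by simpa using hc
      rw [this, h3, if_neg (fun h => hc (hm.mp h))]
      simp only [List.length_cons]; push_cast; omega

theorem pvDupLoop_score (w : String) : pvDupLoop [] 0 w.toList = pvScore w := by
  rw [pvDupLoop_eq, pvScore]
  have : PySem.Set.ofList ([] : List Char) = ([] : List Char) := rfl
  rw [this, PySem.Set.update_nil_left]
  simp

theorem pvFilter_eq (potentials : List String) (t : Int) :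
    potentials.foldl (fun acc word =>
      if pvDupLoop [] 0 word.toList ≤ t then acc ++ [word] else acc) [] =
    pvRefilter (potentials.map (fun w => (w, pvScore w))) t := by
  induction potentials using List.reverseRecOn with
  | nil => rfl
  | append_singleton xs x ih =>
    simp only [List.foldl_append, List.foldl_cons, List.foldl_nil, List.map_append,
      List.map_cons, List.map_nil, pvRefilter, List.filter_append, List.map_append] at *
    rw [ih, pvDupLoop_score]
    by_cases h : pvScore x ≤ t <;> simp [h]

theorem pvMain : ∀ (fuel : Nat) (potentials : List String) (t : Int), fuel = (6 - t).toNat →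
    pvRecA potentials fuel t =
      pvClimb (potentials.map (fun w => (w, pvScore w))) fuel t
        (pvRefilter (potentials.map (fun w => (w, pvScore w))) t) := by
  intro fuel
  induction fuel with
  | zero =>
    intro potentials t hf
    rw [pvRecA, pvClimb]
    simp only [pvFilter_eq potentials t, List.length_eq_zero_iff]
  | succ f ih =>
    intro potentials t hf
    rw [pvRecA, pvClimb]
    simp only [pvFilter_eq potentials t, List.length_eq_zero_iff]
    split_ifs with h
    · exact ih potentials (t + 1) (by omega)
    · rfl

-- ===== VERDICT (by name: the statement is the Claim_ definition above) =====
theorem getDifferentCharWords_spec : Claim_equal_getDifferentCharWords := by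
  intro potentials t _ _
  unfold Spec_getDifferentCharWords getDifferentCharWords getDifferentCharWords_alt
  exact pvMain (6 - t).toNat potentials t rfl
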